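-- pv_equiv track=rewrite | github.com/Kev1CO/cocofest | examples/data_process/static_biosiglive.py | slicing
-- ===== SOURCE A (Python) =====
-- def slicing(data, time):
--     first = 0
--     sliced_data = []
--     for i in range(len(time)):
--         last = first + len(time[i])
--         sliced_data.append(data[first:last])
--         first = last
--     return sliced_data
-- ===== SOURCE B (Python) =====
-- def slicing(data, time):
--     # Recursive decomposition: take the head chunk off the front of data and
--     # recurse on the remaining data and remaining time segments; no offsets kept.
--     if not time:
--         return []
--     k = len(time[0])
--     return [data[:k]] + slicing(data[k:], time[1:])
-- ===== Notes on version B (the rewrite author's own statement) =====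
-- stated objective: alternative
-- what changed: B is structurally recursive with no index arithmetic: it peels the head chunk off the front of data (data[:k]) and recurses on the shrunken remainder data[k:] with the remaining segments, whereas A iterates with a threaded running offset and absolute slice positions.
import Mathlib
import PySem

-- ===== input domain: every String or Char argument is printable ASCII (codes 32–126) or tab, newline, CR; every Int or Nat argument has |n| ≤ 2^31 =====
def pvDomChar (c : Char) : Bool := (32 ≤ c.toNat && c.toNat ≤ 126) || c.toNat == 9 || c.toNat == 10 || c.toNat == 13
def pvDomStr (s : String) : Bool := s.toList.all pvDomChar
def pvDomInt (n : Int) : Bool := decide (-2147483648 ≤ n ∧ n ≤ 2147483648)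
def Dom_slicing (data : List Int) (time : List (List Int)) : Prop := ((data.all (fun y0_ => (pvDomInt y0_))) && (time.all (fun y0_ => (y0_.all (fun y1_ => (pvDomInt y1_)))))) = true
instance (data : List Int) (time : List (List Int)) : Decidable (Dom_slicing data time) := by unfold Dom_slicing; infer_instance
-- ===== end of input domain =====

-- B peels the head chunk off the front of data and recurses on the remainder (structural
-- recursion, no offset arithmetic) instead of A's loop with a running offset; proved equal everywhere.


-- ===== PORT A =====
-- loop over time threading (first, sliced_data); appends data[first:last] each step
def slicing (data : List Int) (time : List (List Int)) : List (List Int) :=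
  (time.foldl
    (fun (st : Int × List (List Int)) t =>
      let last := st.1 + PySem.List.len t
      (last, st.2 ++ [PySem.List.slice data (some st.1) (some last)]))
    (0, [])).2

-- ===== PORT B =====
-- if time is empty return []; else head chunk = data[:k], recurse on data[k:] and time[1:]
def slicing_alt (data : List Int) (time : List (List Int)) : List (List Int) :=
  match time with
  | [] => []
  | t :: ts =>
      PySem.List.slice data none (some (PySem.List.len t)) ::
        slicing_alt (PySem.List.slice data (some (PySem.List.len t)) none) ts

-- ===== PRECONDITION & SPEC =====
def Spec_slicing (data : List Int) (time : List (List Int)) (out : List (List Int)) : Prop := out = slicing_alt data time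
instance (data : List Int) (time : List (List Int)) (out : List (List Int)) : Decidable (Spec_slicing data time out) := by unfold Spec_slicing; infer_instance

-- ===== CLAIM (what is proved, stated in full; the proofs are below) =====
def Claim_equal_slicing : Prop := ∀ (data : List Int) (time : List (List Int)), Dom_slicing data time → Spec_slicing data time (slicing data time)

-- ===== LEMMAS AND PROOFS =====

-- canonical chunk list: slices of data between running offsets
def chunks (data : List Int) (first : Int) : List (List Int) → List (List Int)
  | [] => []
  | t :: ts =>
      PySem.List.slice data (some first) (some (first + PySem.List.len t)) ::
        chunks data (first + PySem.List.len t) ts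

theorem slicing_loop_eq (data : List Int) (time : List (List Int)) :
    ∀ (first : Int) (acc : List (List Int)),
      (time.foldl
        (fun (st : Int × List (List Int)) t =>
          let last := st.1 + PySem.List.len t
          (last, st.2 ++ [PySem.List.slice data (some st.1) (some last)]))
        (first, acc)).2 = acc ++ chunks data first time := by
  induction time with
  | nil => intro first acc; simp [chunks]
  | cons t ts ih =>
      intro first acc
      simp only [List.foldl_cons, chunks]
      rw [ih]
      simp

theorem chunks_eq_alt (data : List Int) (time : List (List Int)) :
    ∀ (j : ℕ), chunks data (j : Int) time = slicing_alt (data.drop j) time := by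
  induction time with
  | nil => intro j; simp [chunks, slicing_alt]
  | cons t ts ih =>
      intro j
      simp only [chunks, slicing_alt, PySem.List.len]
      rw [PySem.List.slice_natCast_add, PySem.List.slice_to_natCast,
        PySem.List.slice_from_natCast, List.drop_drop]
      have hj : (j : Int) + (t.length : Int) = ((j + t.length : ℕ) : Int) := by push_cast; ring
      rw [hj, ih (j + t.length)]

-- ===== VERDICT (by name: the statement is the Claim_ definition above) =====
theorem slicing_spec : Claim_equal_slicing := by
  intro data time _
  unfold Spec_slicing slicing
  rw [slicing_loop_eq data time 0 []]
  have := chunks_eq_alt data time 0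
  simpa using this
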